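-- pv_equiv track=rewrite | github.com/freerangehen/aoc_2020 | day6.py | yes_sum2
-- ===== SOURCE A (Python) =====
-- from typing import List
--
-- def yes_sum2(input: str) -> List[List[str]]:
--     grps = input.split("\n\n")
--
--     sum_ = 0
--     for grp in grps:
--         grp_ans = []
--         for person in grp.split("\n"):
--             ans = person.replace(" ", "")
--             ans = set(ans)
--             if len(ans) > 0:
--                 grp_ans.append(ans)
--         sum_ += len(set.intersection(*grp_ans))
--
--     return sum_
-- ===== SOURCE B (Python) =====
-- def yes_sum2(input: str) -> int:
--     total = 0
--     for grp in input.split("\n\n"):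
--         counts = {}
--         num = 0
--         for person in grp.split("\n"):
--             letters = set(person.replace(" ", ""))
--             if letters:
--                 num += 1
--                 for c in letters:
--                     counts[c] = counts.get(c, 0) + 1
--         total += sum(1 for v in counts.values() if v == num)
--     return total
-- ===== Notes on version B (the rewrite author's own statement) =====
-- stated objective: alternative
-- what changed: Replaces the per-group fold of set intersections with a single frequency-dictionary pass: count in how many (non-empty) persons each letter occurs and add the number of letters whose count equals the number of persons.
-- crash fix: On inputs containing a group with no non-empty person (e.g. the empty string), A raises TypeError from set.intersection(*[]); B returns 0 for such a group. — e.g. on yes_sum2(""): A raises TypeError, B returns 0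
import Mathlib
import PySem

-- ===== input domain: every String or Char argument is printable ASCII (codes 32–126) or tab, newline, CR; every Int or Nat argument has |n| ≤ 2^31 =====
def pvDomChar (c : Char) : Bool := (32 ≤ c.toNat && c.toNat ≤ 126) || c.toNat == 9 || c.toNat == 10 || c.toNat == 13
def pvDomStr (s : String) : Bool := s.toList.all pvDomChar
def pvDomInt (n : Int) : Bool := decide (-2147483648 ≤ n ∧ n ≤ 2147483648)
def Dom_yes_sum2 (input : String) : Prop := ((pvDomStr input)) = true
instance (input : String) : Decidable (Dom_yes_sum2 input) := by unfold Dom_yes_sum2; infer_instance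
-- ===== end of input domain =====

-- B replaces A's per-group fold of set intersections by one letter-frequency dictionary per group
-- (counting the letters whose frequency equals the number of non-empty persons); alternative, not faster.

-- ===== PORT A =====
def yes_sum2 (input : String) : Int :=
  let grps := PySem.Chars.splitOn input.toList "\n\n".toList
  grps.foldl (fun sum_ grp =>
    let grp_ans : List (PySem.Set Char) :=
      (PySem.Chars.splitOn grp "\n".toList).foldl (fun acc person =>
        let ans := PySem.Chars.replace person " ".toList "".toList
        let ans := PySem.Set.ofList ans
        if 0 < PySem.Set.len ans then acc ++ [ans] else acc) []
    match grp_ans with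
    | [] => sum_   -- Python raises TypeError here (set.intersection(*[])); excluded by Pre_
    | s :: rest => sum_ + PySem.Set.len (rest.foldl PySem.Set.inter s)) 0

-- ===== PORT B =====
def yes_sum2_alt (input : String) : Int :=
  (PySem.Chars.splitOn input.toList "\n\n".toList).foldl (fun total grp =>
    let st := (PySem.Chars.splitOn grp "\n".toList).foldl
      (fun (p : PySem.Dict Char Int × Int) person =>
        let letters : PySem.Set Char :=
          PySem.Set.ofList (PySem.Chars.replace person " ".toList "".toList)
        if letters.isEmpty then p
        else (letters.foldl (fun d c => d.insert c (d.getD c 0 + 1)) p.1, p.2 + 1))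
      (PySem.Dict.empty, 0)
    total + ((st.1.values.filter (fun v => v == st.2)).length : Int)) 0

-- ===== PRECONDITION & SPEC =====
-- Pre_ excludes exactly the inputs on which A raises TypeError: those containing a group
-- whose persons are all spaces-only (set.intersection is then called with no arguments).
def Pre_yes_sum2 (input : String) : Prop :=
  (PySem.Chars.splitOn input.toList "\n\n".toList).all (fun grp =>
    (PySem.Chars.splitOn grp "\n".toList).any (fun person =>
      person.any (fun c => c != ' '))) = true
instance (input : String) : Decidable (Pre_yes_sum2 input) := by unfold Pre_yes_sum2; infer_instance
def pvWitness_yes_sum2 : String := "ab\nac\n\nx y"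

-- On inputs containing a group with no non-empty person A raises TypeError; B returns the sum counting 0 for such a group.
def Raises_yes_sum2 (input : String) : Prop :=
  (PySem.Chars.splitOn input.toList "\n\n".toList).any (fun grp =>
    (PySem.Chars.splitOn grp "\n".toList).all (fun person =>
      person.all (fun c => c == ' '))) = true
instance (input : String) : Decidable (Raises_yes_sum2 input) := by unfold Raises_yes_sum2; infer_instance
def pvRaiseWitness_yes_sum2 : String := ""
def pvRaiseWitnessOut_yes_sum2 : Int := 0

def Spec_yes_sum2 (input : String) (out : Int) : Prop := out = yes_sum2_alt input
instance (input : String) (out : Int) : Decidable (Spec_yes_sum2 input out) := by unfold Spec_yes_sum2; infer_instance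

-- ===== CLAIM (what is proved, stated in full; the proofs are below) =====
def Claim_equal_yes_sum2 : Prop := ∀ (input : String), Dom_yes_sum2 input → Pre_yes_sum2 input → Spec_yes_sum2 input (yes_sum2 input)
def Claim_raises_yes_sum2 : Prop := (∀ (input : String), Dom_yes_sum2 input → Raises_yes_sum2 input → ¬ Pre_yes_sum2 input) ∧ (Dom_yes_sum2 (pvRaiseWitness_yes_sum2) ∧ Raises_yes_sum2 (pvRaiseWitness_yes_sum2) ∧ yes_sum2_alt (pvRaiseWitness_yes_sum2) = pvRaiseWitnessOut_yes_sum2)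

-- ===== LEMMAS AND PROOFS =====

-- the letter set of one person (the same expression appears in both ports)
def pvLetters (person : List Char) : PySem.Set Char :=
  PySem.Set.ofList (PySem.Chars.replace person " ".toList "".toList)

-- replacing " " by "" deletes exactly the spaces
theorem pv_replace_go_space (fuel : Nat) (l acc : List Char) (h : l.length ≤ fuel) :
    PySem.Chars.replace.go [' '] [] fuel l acc = acc.reverse ++ l.filter (· != ' ') := by
  induction fuel generalizing l acc with
  | zero =>
    have : l = [] := List.length_eq_zero_iff.mp (Nat.le_zero.mp h)
    subst this
    simp [PySem.Chars.replace.go]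
  | succ n ih =>
    cases l with
    | nil => simp [PySem.Chars.replace.go]
    | cons c t =>
      simp only [PySem.Chars.replace.go]
      by_cases hc : c = ' '
      · subst hc
        have hp : [' '].isPrefixOf (' ' :: t) = true := by simp [List.isPrefixOf]
        rw [hp]
        simp only [if_true]
        rw [show List.drop [' '].length (' ' :: t) = t from rfl,
            ih t _ (by simpa using h)]
        simp
      · have hp : [' '].isPrefixOf (c :: t) = false := by
          simp [List.isPrefixOf]; exact fun h' => absurd h'.symm hc
        rw [hp]
        simp only [Bool.false_eq_true, if_false]
        rw [ih t _ (by simpa using h)]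
        simp [hc]

theorem pv_replace_space (s : List Char) :
    PySem.Chars.replace s " ".toList "".toList = s.filter (· != ' ') := by
  show PySem.Chars.replace s [' '] [] = _
  unfold PySem.Chars.replace
  simp only [List.isEmpty]
  exact pv_replace_go_space s.length s [] le_rfl

theorem pv_ofList_eq_nil_iff {α : Type} [BEq α] [LawfulBEq α] (xs : List α) :
    PySem.Set.ofList xs = [] ↔ xs = [] := by
  constructor
  · intro h
    cases xs with
    | nil => rfl
    | cons x t =>
      exfalso
      have := (PySem.Set.mem_ofList (x :: t) x).mpr (by simp)
      rw [h] at this; simp at this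
  · intro h; subst h; rfl

theorem pv_letters_ne_nil_iff (person : List Char) :
    pvLetters person ≠ [] ↔ ∃ c ∈ person, c ≠ ' ' := by
  unfold pvLetters
  rw [Ne, pv_ofList_eq_nil_iff, pv_replace_space]
  simp [List.filter_eq_nil_iff]

-- A's inner loop builds the list of non-empty letter sets
theorem pv_A_loop (l : List (List Char)) (acc : List (PySem.Set Char)) :
    l.foldl (fun acc person =>
        let ans := PySem.Chars.replace person " ".toList "".toList
        let ans := PySem.Set.ofList ans
        if 0 < PySem.Set.len ans then acc ++ [ans] else acc) acc
      = acc ++ (l.map pvLetters).filter (fun s => !s.isEmpty) := by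
  induction l generalizing acc with
  | nil => simp
  | cons person t ih =>
    simp only [List.foldl_cons, List.map_cons]
    by_cases h : (0:Int) < PySem.Set.len (pvLetters person)
    · have hne : (pvLetters person).isEmpty = false := by
        rcases hp : (pvLetters person) with _ | _ <;> simp_all [PySem.Set.len]
      simp only [pvLetters] at h hne ⊢
      have hne' : (PySem.Set.ofList (PySem.Chars.replace person [' '] [])).isEmpty = false := hne
      rw [if_pos h, ih]
      simp [hne']
    · have he : (pvLetters person).isEmpty = true := by
        rcases hp : (pvLetters person) with _ | _ <;> simp_all [PySem.Set.len]
      simp only [pvLetters] at h he ⊢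
      have he'' : (PySem.Set.ofList (PySem.Chars.replace person [' '] [])).isEmpty = true := he
      rw [if_neg h, ih]
      simp [he'']

-- B's inner loop: the dictionary accumulates over all kept letters, the counter over the kept sets
theorem pv_B_loop (l : List (List Char)) (st : PySem.Dict Char Int × Int) :
    l.foldl (fun (p : PySem.Dict Char Int × Int) person =>
        let letters : PySem.Set Char :=
          PySem.Set.ofList (PySem.Chars.replace person " ".toList "".toList)
        if letters.isEmpty then p
        else (letters.foldl (fun d c => d.insert c (d.getD c 0 + 1)) p.1, p.2 + 1)) st
      = (((l.map pvLetters).filter (fun s => !s.isEmpty)).flatten.foldl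
            (fun d c => d.insert c (d.getD c 0 + 1)) st.1,
         st.2 + ((l.map pvLetters).filter (fun s => !s.isEmpty)).length) := by
  induction l generalizing st with
  | nil => simp
  | cons person t ih =>
    simp only [List.foldl_cons, List.map_cons]
    rw [show (PySem.Set.ofList (PySem.Chars.replace person " ".toList "".toList))
          = pvLetters person from rfl]
    by_cases he : (pvLetters person).isEmpty = true
    · rw [he]
      simp only [if_true, ih]
      simp [he]
    · have he' : (pvLetters person).isEmpty = false := by simpa using he
      rw [he']
      simp only [Bool.false_eq_true, if_false, ih]
      simp only [he', Bool.not_false, List.filter_cons_of_pos, List.flatten_cons,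
        List.length_cons, List.foldl_append, Prod.mk.injEq]
      exact ⟨by trivial, by omega⟩

-- folding set intersections is filtering by membership in every set
theorem pv_foldl_inter (rest : List (PySem.Set Char)) (s : PySem.Set Char) :
    rest.foldl PySem.Set.inter s = s.filter (fun c => rest.all (fun t => t.contains c)) := by
  induction rest generalizing s with
  | nil => simp
  | cons t ts ih =>
    simp only [List.foldl_cons, ih, PySem.Set.inter, List.filter_filter]
    apply List.filter_congr
    intro c _
    simp [Bool.and_comm]

-- counting a letter across nodup sets
theorem pv_count_flatten_le (sets : List (PySem.Set Char)) (h : ∀ s ∈ sets, s.Nodup) (c : Char) :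
    List.count c sets.flatten ≤ sets.length := by
  induction sets with
  | nil => simp
  | cons s t ih =>
    simp only [List.flatten_cons, List.count_append, List.length_cons]
    have h1 : List.count c s ≤ 1 :=
      (List.nodup_iff_count_le_one.mp (h s (by simp))) c
    have h2 := ih (fun x hx => h x (by simp [hx]))
    omega

-- the count equals the number of sets iff the letter is in every set
theorem pv_count_flatten_eq_iff (sets : List (PySem.Set Char)) (h : ∀ s ∈ sets, s.Nodup) (c : Char) :
    List.count c sets.flatten = sets.length ↔ ∀ s ∈ sets, c ∈ s := by
  induction sets with
  | nil => simp
  | cons s t ih =>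
    simp only [List.flatten_cons, List.count_append, List.length_cons, List.mem_cons]
    have h1 : List.count c s ≤ 1 :=
      (List.nodup_iff_count_le_one.mp (h s (by simp))) c
    have h2 := pv_count_flatten_le t (fun x hx => h x (by simp [hx])) c
    have h3 := ih (fun x hx => h x (by simp [hx]))
    have h4 : List.count c s = 1 ↔ c ∈ s := by
      constructor
      · intro hc; exact List.count_pos_iff.mp (by omega)
      · intro hc; have := List.count_pos_iff.mpr hc; omega
    constructor
    · intro he
      have hcc : List.count c s = 1 ∧ List.count c t.flatten = t.length := by omega
      exact fun x hx => hx.elim (fun hxs => hxs ▸ h4.mp hcc.1) (h3.mp hcc.2 x)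
    · intro ha
      have hs : List.count c s = 1 := h4.mpr (ha s (Or.inl rfl))
      have ht : List.count c t.flatten = t.length := h3.mpr (fun x hx => ha x (Or.inr hx))
      omega

-- the per-group equality: intersection size = number of letters whose count is the number of sets
theorem pv_group_eq (s1 : PySem.Set Char) (rest : List (PySem.Set Char))
    (h : ∀ s ∈ s1 :: rest, s.Nodup) :
    PySem.Set.len (rest.foldl PySem.Set.inter s1)
      = (((PySem.Dict.counter (s1 :: rest).flatten).values.filter
            (fun v => v == (((s1 :: rest).length : Nat) : Int))).length : Int) := by
  have hvals : (PySem.Dict.counter (s1 :: rest).flatten).values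
      = (PySem.Set.ofList (s1 :: rest).flatten).map
          (fun k => ((List.count k (s1 :: rest).flatten : Nat) : Int)) := by
    show ((PySem.Dict.counter (s1 :: rest).flatten).items).map (fun x => x.2) = _
    rw [PySem.Dict.items_counter]
    simp [List.map_map, Function.comp]
  rw [pv_foldl_inter, PySem.Set.len, hvals, List.filter_map, List.length_map]
  congr 1
  have hLnd : (s1.filter (fun c => rest.all (fun t => t.contains c))).Nodup :=
    (h s1 (by simp)).filter _
  have hRnd : ((PySem.Set.ofList (s1 :: rest).flatten).filter
      ((fun v => v == (((s1 :: rest).length : Nat) : Int)) ∘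
        (fun k => ((List.count k (s1 :: rest).flatten : Nat) : Int)))).Nodup :=
    (PySem.Set.nodup_ofList (s1 :: rest).flatten).filter _
  rw [← List.toFinset_card_of_nodup hLnd, ← List.toFinset_card_of_nodup hRnd]
  congr 1
  ext c
  simp only [List.mem_toFinset, List.mem_filter, PySem.Set.mem_ofList, List.all_eq_true,
    Function.comp, beq_iff_eq, Nat.cast_inj]
  rw [pv_count_flatten_eq_iff (s1 :: rest) h c]
  constructor
  · rintro ⟨hc1, hall⟩
    refine ⟨List.mem_flatten.mpr ⟨s1, by simp, hc1⟩, ?_⟩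
    intro s hs
    rcases List.mem_cons.mp hs with rfl | hs'
    · exact hc1
    · exact List.contains_iff_mem.mp (hall s hs')
  · rintro ⟨_, hall⟩
    refine ⟨hall s1 (by simp), ?_⟩
    intro t ht
    exact List.contains_iff_mem.mpr (hall t (List.mem_cons_of_mem _ ht))

-- a group's kept-sets list is non-empty iff some person has a non-space character
theorem pv_sets_ne_nil_iff (persons : List (List Char)) :
    (persons.map pvLetters).filter (fun s => !s.isEmpty) ≠ []
      ↔ ∃ person ∈ persons, ∃ c ∈ person, c ≠ ' ' := by
  rw [Ne, List.filter_eq_nil_iff]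
  simp only [not_forall]
  constructor
  · rintro ⟨s, hs, hne⟩
    rcases List.mem_map.mp hs with ⟨person, hp, rfl⟩
    exact ⟨person, hp, (pv_letters_ne_nil_iff person).mp (by
      intro hnil; rw [hnil] at hne; simp at hne)⟩
  · rintro ⟨person, hp, hc⟩
    refine ⟨pvLetters person, List.mem_map_of_mem hp, ?_⟩
    have := (pv_letters_ne_nil_iff person).mpr hc
    rcases hl : pvLetters person with _ | _
    · exact absurd hl this
    · simp [hl]

-- every kept set is nodup
theorem pv_sets_nodup (persons : List (List Char)) :
    ∀ s ∈ (persons.map pvLetters).filter (fun s => !s.isEmpty), s.Nodup := by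
  intro s hs
  rcases List.mem_map.mp (List.mem_of_mem_filter hs) with ⟨person, _, rfl⟩
  exact PySem.Set.nodup_ofList _

-- ===== VERDICT (by name: the statement is the Claim_ definition above) =====
theorem yes_sum2_spec : Claim_equal_yes_sum2 := by
  intro input _ hpre
  show yes_sum2 input = yes_sum2_alt input
  unfold Pre_yes_sum2 at hpre
  rw [List.all_eq_true] at hpre
  unfold yes_sum2 yes_sum2_alt
  simp only []
  apply PySem.List.foldl_congr_mem
  intro acc grp hgrp
  have hP : ∃ person ∈ PySem.Chars.splitOn grp "\n".toList, ∃ c ∈ person, c ≠ ' ' := by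
    simpa [List.any_eq_true, bne_iff_ne] using hpre grp hgrp
  simp only [pv_A_loop, pv_B_loop, List.nil_append]
  set S := ((PySem.Chars.splitOn grp "\n".toList).map pvLetters).filter (fun s => !s.isEmpty)
    with hS
  have hSne : S ≠ [] := (pv_sets_ne_nil_iff _).mpr hP
  rcases hScons : S with _ | ⟨s1, rest⟩
  · exact absurd hScons hSne
  · have hnd : ∀ s ∈ s1 :: rest, s.Nodup := hScons ▸ pv_sets_nodup _
    rw [PySem.Dict.foldl_insert_getD_add_one_eq_counter]
    change acc + PySem.Set.len (List.foldl PySem.Set.inter s1 rest) = _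
    simp only [zero_add]
    rw [pv_group_eq s1 rest hnd]

@[simp] theorem yes_sum2_raises : Claim_raises_yes_sum2 := by
  unfold Claim_raises_yes_sum2
  constructor
  · intro input _ hr hpre
    unfold Raises_yes_sum2 at hr
    unfold Pre_yes_sum2 at hpre
    rw [List.any_eq_true] at hr
    rcases hr with ⟨grp, hgrp, hall⟩
    rw [List.all_eq_true] at hpre hall
    rcases List.any_eq_true.mp (hpre grp hgrp) with ⟨person, hp, hc⟩
    rcases List.any_eq_true.mp hc with ⟨c, hcmem, hcne⟩
    have := List.all_eq_true.mp (hall person hp) c hcmem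
    simp_all
  · exact ⟨by decide, by decide, by decide⟩
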